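-- pv_equiv track=rewrite | github.com/DhairyaShah5/Beyond-Binary-Accuracy | code/utils_data.py | build_slices
-- ===== SOURCE A (Python) =====
-- POS_WORDS = set("""
-- good great excellent amazing wonderful fantastic brilliant awesome loved
-- love enjoyable enjoy best perfect beautiful fun funny hilarious superb
-- outstanding masterpiece memorable touching heartwarming powerful charming
-- delightful impressive engaging gripping thrilling stunning magnificent
-- """.split())
--
-- NEG_WORDS = set("""
-- bad terrible awful horrible worst boring dull stupid poor waste wasted
-- disappointing disappointed hate hated hates annoying pathetic lame ridiculous
-- worse lousy mediocre forgettable painful laughable weak predictable cliched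
-- unwatchable tedious bland flat sloppy uninspired cringe cringy nonsense
-- """.split())
--
-- NEGATIONS = set("""
-- not no never none nothing neither nor hardly scarcely barely without cannot
-- cant couldnt wasnt werent isnt arent dont didnt doesnt wont wouldnt shouldnt
-- """.split())
--
-- def build_slices(cleaned_texts):
--     """Build challenging-slice index lists from cleaned test texts.
--
--     Thresholds (matching project reports):
--         - Long reviews:    >= 500 words
--         - Negation-heavy:  >= 2 negation cues
--         - Mixed sentiment: >= 2 positive AND >= 2 negative lexicon hits
--
--     Returns:
--         dict mapping slice_name -> list[int] of indices
--     """
--     long_idx, neg_idx, mixed_idx = [], [], []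
--
--     for i, t in enumerate(cleaned_texts):
--         words = t.split()
--         wc = len(words)
--
--         # Long reviews
--         if wc >= 500:
--             long_idx.append(i)
--
--         # Negation-heavy
--         neg_cues = sum(w in NEGATIONS for w in words)
--         if neg_cues >= 2:
--             neg_idx.append(i)
--
--         # Mixed sentiment
--         pos_hits = sum(w in POS_WORDS for w in words)
--         neg_hits = sum(w in NEG_WORDS for w in words)
--         if pos_hits >= 2 and neg_hits >= 2:
--             mixed_idx.append(i)
--
--     slices = {
--         "Full test set": list(range(len(cleaned_texts))),
--         f"Long reviews (>=500 words) [n={len(long_idx)}]": long_idx,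
--         f"Negation-heavy (>=2 cues) [n={len(neg_idx)}]": neg_idx,
--         f"Mixed sentiment (pos&neg>=2) [n={len(mixed_idx)}]": mixed_idx,
--     }
--     return slices
-- ===== SOURCE B (Python) =====
-- POS_WORDS = set("""
-- good great excellent amazing wonderful fantastic brilliant awesome loved
-- love enjoyable enjoy best perfect beautiful fun funny hilarious superb
-- outstanding masterpiece memorable touching heartwarming powerful charming
-- delightful impressive engaging gripping thrilling stunning magnificent
-- """.split())
--
-- NEG_WORDS = set("""
-- bad terrible awful horrible worst boring dull stupid poor waste wasted
-- disappointing disappointed hate hated hates annoying pathetic lame ridiculous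
-- worse lousy mediocre forgettable painful laughable weak predictable cliched
-- unwatchable tedious bland flat sloppy uninspired cringe cringy nonsense
-- """.split())
--
-- NEGATIONS = set("""
-- not no never none nothing neither nor hardly scarcely barely without cannot
-- cant couldnt wasnt werent isnt arent dont didnt doesnt wont wouldnt shouldnt
-- """.split())
--
--
-- def build_slices(cleaned_texts):
--     """Bag-of-words variant: each text is reduced once to (word_count,
--     frequency dict); the slice tests then look up the fixed lexicons in the
--     bag (lexicon-side scan) instead of scanning the word list against the
--     lexicon sets, and each slice is a comprehension over the bags."""
--     bags = []
--     for t in cleaned_texts: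
--         words = t.split()
--         freq = {}
--         for w in words:
--             freq[w] = freq.get(w, 0) + 1
--         bags.append((len(words), freq))
--
--     long_idx = [i for i, (wc, _) in enumerate(bags) if wc >= 500]
--     neg_idx = [i for i, (_, f) in enumerate(bags)
--                if sum(f.get(w, 0) for w in NEGATIONS) >= 2]
--     mixed_idx = [i for i, (_, f) in enumerate(bags)
--                  if sum(f.get(w, 0) for w in POS_WORDS) >= 2
--                  and sum(f.get(w, 0) for w in NEG_WORDS) >= 2]
--
--     return {
--         "Full test set": list(range(len(cleaned_texts))),
--         f"Long reviews (>=500 words) [n={len(long_idx)}]": long_idx,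
--         f"Negation-heavy (>=2 cues) [n={len(neg_idx)}]": neg_idx,
--         f"Mixed sentiment (pos&neg>=2) [n={len(mixed_idx)}]": mixed_idx,
--     }
-- ===== Notes on version B (the rewrite author's own statement) =====
-- stated objective: alternative
-- what changed: Each text is reduced once to a bag-of-words (word count plus frequency dict) and the three slices become staged comprehensions that look the fixed lexicons up in the bag (lexicon-side scan over ~100 keys) instead of scanning every word against the three sets inside one accumulator loop.
import Mathlib
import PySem

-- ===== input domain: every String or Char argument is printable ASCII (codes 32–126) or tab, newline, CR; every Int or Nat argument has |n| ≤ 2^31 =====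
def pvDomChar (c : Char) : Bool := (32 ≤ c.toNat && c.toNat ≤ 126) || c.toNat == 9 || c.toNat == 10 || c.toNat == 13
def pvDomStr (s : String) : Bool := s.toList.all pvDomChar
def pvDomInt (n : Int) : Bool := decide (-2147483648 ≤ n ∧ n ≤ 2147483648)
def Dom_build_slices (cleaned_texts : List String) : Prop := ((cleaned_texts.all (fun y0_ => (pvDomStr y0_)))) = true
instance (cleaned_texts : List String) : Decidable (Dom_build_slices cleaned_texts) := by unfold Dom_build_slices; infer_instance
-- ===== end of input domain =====

-- B reduces each text once to a bag-of-words (word count + frequency dict) and builds each slice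
-- as a comprehension that looks the fixed lexicons up in the bag (objective: alternative).

-- word sets (module constants, shared by both ports)
def pvPosWords : List String := ["good","great","excellent","amazing","wonderful","fantastic","brilliant","awesome","loved","love","enjoyable","enjoy","best","perfect","beautiful","fun","funny","hilarious","superb","outstanding","masterpiece","memorable","touching","heartwarming","powerful","charming","delightful","impressive","engaging","gripping","thrilling","stunning","magnificent"]
def pvNegWords : List String := ["bad","terrible","awful","horrible","worst","boring","dull","stupid","poor","waste","wasted","disappointing","disappointed","hate","hated","hates","annoying","pathetic","lame","ridiculous","worse","lousy","mediocre","forgettable","painful","laughable","weak","predictable","cliched","unwatchable","tedious","bland","flat","sloppy","uninspired","cringe","cringy","nonsense"]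
def pvNegations : List String := ["not","no","never","none","nothing","neither","nor","hardly","scarcely","barely","without","cannot","cant","couldnt","wasnt","werent","isnt","arent","dont","didnt","doesnt","wont","wouldnt","shouldnt"]

-- ===== PORT A =====
def build_slices (cleaned_texts : List String) : List (String × List Int) :=
  let st := (PySem.List.enumerate cleaned_texts 0).foldl
    (fun (acc : List Int × List Int × List Int) (p : Int × String) =>
      let words := PySem.Str.split₀ p.2
      let wc := words.length
      let long_idx := if wc ≥ 500 then acc.1 ++ [p.1] else acc.1
      let neg_cues := words.foldl (fun s w => s + (if pvNegations.contains w then (1:Int) else 0)) 0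
      let neg_idx := if neg_cues ≥ 2 then acc.2.1 ++ [p.1] else acc.2.1
      let pos_hits := words.foldl (fun s w => s + (if pvPosWords.contains w then (1:Int) else 0)) 0
      let neg_hits := words.foldl (fun s w => s + (if pvNegWords.contains w then (1:Int) else 0)) 0
      let mixed_idx := if pos_hits ≥ 2 ∧ neg_hits ≥ 2 then acc.2.2 ++ [p.1] else acc.2.2
      (long_idx, neg_idx, mixed_idx))
    ([], [], [])
  [("Full test set", PySem.List.pyRange 0 (cleaned_texts.length : Int) 1),
   ("Long reviews (>=500 words) [n=" ++ PySem.Int.toStr (st.1.length : Int) ++ "]", st.1),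
   ("Negation-heavy (>=2 cues) [n=" ++ PySem.Int.toStr (st.2.1.length : Int) ++ "]", st.2.1),
   ("Mixed sentiment (pos&neg>=2) [n=" ++ PySem.Int.toStr (st.2.2.length : Int) ++ "]", st.2.2)]

-- ===== PORT B =====
-- one bag per text: (len(words), frequency dict built by freq[w] = freq.get(w,0)+1)
def pvBag (t : String) : Int × PySem.Dict String Int :=
  let words := PySem.Str.split₀ t
  let freq := words.foldl (fun (d : PySem.Dict String Int) w => d.insert w (d.getD w 0 + 1)) PySem.Dict.empty
  ((words.length : Int), freq)

def build_slices_alt (cleaned_texts : List String) : List (String × List Int) :=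
  let bags := cleaned_texts.map pvBag
  let long_idx := ((PySem.List.enumerate bags 0).filter
    (fun p => decide (500 ≤ p.2.1))).map (·.1)
  let neg_idx := ((PySem.List.enumerate bags 0).filter
    (fun p => decide (2 ≤ pvNegations.foldl (fun s w => s + p.2.2.getD w 0) 0))).map (·.1)
  let mixed_idx := ((PySem.List.enumerate bags 0).filter
    (fun p => decide (2 ≤ pvPosWords.foldl (fun s w => s + p.2.2.getD w 0) 0
                    ∧ 2 ≤ pvNegWords.foldl (fun s w => s + p.2.2.getD w 0) 0))).map (·.1)
  [("Full test set", PySem.List.pyRange 0 (cleaned_texts.length : Int) 1),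
   ("Long reviews (>=500 words) [n=" ++ PySem.Int.toStr (long_idx.length : Int) ++ "]", long_idx),
   ("Negation-heavy (>=2 cues) [n=" ++ PySem.Int.toStr (neg_idx.length : Int) ++ "]", neg_idx),
   ("Mixed sentiment (pos&neg>=2) [n=" ++ PySem.Int.toStr (mixed_idx.length : Int) ++ "]", mixed_idx)]

-- ===== PRECONDITION & SPEC =====
def Spec_build_slices (cleaned_texts : List String) (out : List (String × List Int)) : Prop := out = build_slices_alt cleaned_texts
instance (cleaned_texts : List String) (out : List (String × List Int)) : Decidable (Spec_build_slices cleaned_texts out) := by unfold Spec_build_slices; infer_instance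

-- ===== CLAIM (what is proved, stated in full; the proofs are below) =====
def Claim_equal_build_slices : Prop := ∀ (cleaned_texts : List String), Dom_build_slices cleaned_texts → Spec_build_slices cleaned_texts (build_slices cleaned_texts)

-- ===== LEMMAS AND PROOFS =====

-- sum over a nodup key list of the indicator of one word
lemma pv_ind_sum (L : List String) (x : String) (hL : L.Nodup) :
    (L.map (fun w => if w == x then (1:Int) else 0)).sum = if L.contains x then 1 else 0 := by
  induction L with
  | nil => simp
  | cons y ys ih =>
    simp only [List.nodup_cons] at hL
    simp only [List.map_cons, List.sum_cons, ih hL.2, List.contains_cons]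
    by_cases hyx : y = x
    · subst hyx
      simp [hL.1]
    · simp [Ne.symm hyx, beq_iff_eq, hyx]

-- lexicon-side count sum = word-side membership indicator sum (L nodup)
lemma pv_count_sum (L ws : List String) (hL : L.Nodup) :
    (L.map (fun w => (ws.count w : Int))).sum
      = (ws.map (fun w => if L.contains w then (1:Int) else 0)).sum := by
  induction ws with
  | nil => simp
  | cons x xs ih =>
    have : (L.map (fun w => ((x :: xs).count w : Int))).sum
        = (L.map (fun w => (xs.count w : Int))).sum
          + (L.map (fun w => if w == x then (1:Int) else 0)).sum := by
      rw [← List.sum_map_add]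
      refine congrArg List.sum (List.map_congr_left ?_)
      intro w _
      by_cases hwx : x = w
      · subst hwx; simp
      · simp [hwx]
        exact fun h => hwx h.symm
    rw [this, ih, pv_ind_sum L x hL]
    simp only [List.map_cons, List.sum_cons]
    omega
-- the per-text bag lookup sum equals A's membership scan sum
lemma pv_bag_sum (L : List String) (t : String) (hL : L.Nodup) :
    L.foldl (fun s w => s + (pvBag t).2.getD w 0) 0
      = (PySem.Str.split₀ t).foldl
          (fun s w => s + (if L.contains w then (1:Int) else 0)) 0 := by
  have hc : (pvBag t).2 = PySem.Dict.counter (PySem.Str.split₀ t) := by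
    simp [pvBag, PySem.Dict.foldl_insert_getD_add_one_eq_counter]
  rw [hc, PySem.List.foldl_add, PySem.List.foldl_add]
  simp only [PySem.Dict.getD_counter]
  rw [pv_count_sum _ _ hL]

-- enumerate of a mapped list
lemma pv_enumerate_map {α β : Type} (f : α → β) (xs : List α) (s : Int) :
    PySem.List.enumerate (xs.map f) s
      = (PySem.List.enumerate xs s).map (fun q => (q.1, f q.2)) := by
  induction xs generalizing s with
  | nil => simp [PySem.List.enumerate_nil]
  | cons x xs ih => simp [PySem.List.enumerate_cons, ih]

-- A's single accumulator loop, characterised as three filters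
lemma pv_foldA (l : List (Int × String)) (a b c : List Int) :
    l.foldl
      (fun (acc : List Int × List Int × List Int) (p : Int × String) =>
        let words := PySem.Str.split₀ p.2
        let wc := words.length
        let long_idx := if wc ≥ 500 then acc.1 ++ [p.1] else acc.1
        let neg_cues := words.foldl (fun s w => s + (if pvNegations.contains w then (1:Int) else 0)) 0
        let neg_idx := if neg_cues ≥ 2 then acc.2.1 ++ [p.1] else acc.2.1
        let pos_hits := words.foldl (fun s w => s + (if pvPosWords.contains w then (1:Int) else 0)) 0
        let neg_hits := words.foldl (fun s w => s + (if pvNegWords.contains w then (1:Int) else 0)) 0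
        let mixed_idx := if pos_hits ≥ 2 ∧ neg_hits ≥ 2 then acc.2.2 ++ [p.1] else acc.2.2
        (long_idx, neg_idx, mixed_idx))
      (a, b, c)
    = (a ++ (l.filter (fun p => decide ((PySem.Str.split₀ p.2).length ≥ 500))).map (·.1),
       b ++ (l.filter (fun p => decide ((PySem.Str.split₀ p.2).foldl (fun s w => s + (if pvNegations.contains w then (1:Int) else 0)) 0 ≥ 2))).map (·.1),
       c ++ (l.filter (fun p => decide ((PySem.Str.split₀ p.2).foldl (fun s w => s + (if pvPosWords.contains w then (1:Int) else 0)) 0 ≥ 2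
              ∧ (PySem.Str.split₀ p.2).foldl (fun s w => s + (if pvNegWords.contains w then (1:Int) else 0)) 0 ≥ 2))).map (·.1)) := by
  induction l generalizing a b c with
  | nil => simp
  | cons p l ih =>
    simp only [List.foldl_cons, List.filter_cons]
    rw [ih]
    by_cases h1 : 500 ≤ (PySem.Str.split₀ p.2).length <;>
    by_cases h2 : 2 ≤ (PySem.Str.split₀ p.2).foldl (fun s w => s + (if w ∈ pvNegations then (1:Int) else 0)) 0 <;>
    by_cases h4 : 2 ≤ (PySem.Str.split₀ p.2).foldl (fun s w => s + (if w ∈ pvPosWords then (1:Int) else 0)) 0 <;>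
    by_cases h5 : 2 ≤ (PySem.Str.split₀ p.2).foldl (fun s w => s + (if w ∈ pvNegWords then (1:Int) else 0)) 0 <;>
    simp [h1, h2, h4, h5, List.append_assoc]
theorem pv_nodup_neg : pvNegations.Nodup := by decide
theorem pv_nodup_pos : pvPosWords.Nodup := by decide
theorem pv_nodup_negw : pvNegWords.Nodup := by decide

-- pointwise equality of B's bag-based slice conditions with A's membership-scan conditions
lemma pv_cond_long (q : Int × String) :
    (decide (500 ≤ (pvBag q.2).1)) = decide ((PySem.Str.split₀ q.2).length ≥ 500) := by
  simp only [pvBag]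
  rw [Bool.eq_iff_iff]
  simp only [decide_eq_true_iff, ge_iff_le]
  omega

lemma pv_cond_neg (q : Int × String) :
    (decide (2 ≤ pvNegations.foldl (fun s w => s + (pvBag q.2).2.getD w 0) 0))
      = decide ((PySem.Str.split₀ q.2).foldl (fun s w => s + (if pvNegations.contains w then (1:Int) else 0)) 0 ≥ 2) := by
  rw [pv_bag_sum _ _ pv_nodup_neg]

lemma pv_cond_mixed (q : Int × String) :
    (decide (2 ≤ pvPosWords.foldl (fun s w => s + (pvBag q.2).2.getD w 0) 0
           ∧ 2 ≤ pvNegWords.foldl (fun s w => s + (pvBag q.2).2.getD w 0) 0))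
      = decide ((PySem.Str.split₀ q.2).foldl (fun s w => s + (if pvPosWords.contains w then (1:Int) else 0)) 0 ≥ 2
           ∧ (PySem.Str.split₀ q.2).foldl (fun s w => s + (if pvNegWords.contains w then (1:Int) else 0)) 0 ≥ 2) := by
  rw [pv_bag_sum _ _ pv_nodup_pos, pv_bag_sum _ _ pv_nodup_negw]

-- ===== VERDICT (by name: the statement is the Claim_ definition above) =====
theorem build_slices_spec : Claim_equal_build_slices := by
  intro xs _
  unfold Spec_build_slices build_slices build_slices_alt
  rw [pv_foldA]
  simp only [pv_enumerate_map, List.filter_map, List.map_map, Function.comp_def,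
    pv_cond_long, pv_cond_neg, pv_cond_mixed, List.nil_append]
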